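-- pv_equiv track=rewrite | github.com/Glass1234/rgb_light | sreen.py | divide_pixels_by_width
-- ===== SOURCE A (Python) =====
-- def divide_pixels_by_width(arr, num_parts):
--     num_cols = len(arr[0])
--
--     # Вычисление ширины каждой части
--     part_width = num_cols // num_parts
--
--     divided_parts = []
--
--     # Разделение массива пикселей по ширине
--     for i in range(num_parts):
--         start_col = i * part_width
--         end_col = start_col + part_width
--
--         # Отдельная часть массива пикселей
--         part = [row[start_col:end_col] for row in arr]
--
--         divided_parts.append(part)
--
--     return divided_parts
-- ===== SOURCE B (Python) =====
-- def divide_pixels_by_width(arr, num_parts):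
--     num_cols = len(arr[0])
--     part_width = num_cols // num_parts
--     # chunk each row into num_parts consecutive slices, then transpose
--     chunks_per_row = [
--         [row[j * part_width:(j + 1) * part_width] for j in range(num_parts)]
--         for row in arr
--     ]
--     return [list(group) for group in zip(*chunks_per_row)]
-- ===== Notes on version B (the rewrite author's own statement) =====
-- stated objective: alternative
-- what changed: B chunks each row into its num_parts slices and then transposes the per-row chunk lists with zip(*...), instead of A's per-part outer loop that slices every row once per part.
import Mathlib
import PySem

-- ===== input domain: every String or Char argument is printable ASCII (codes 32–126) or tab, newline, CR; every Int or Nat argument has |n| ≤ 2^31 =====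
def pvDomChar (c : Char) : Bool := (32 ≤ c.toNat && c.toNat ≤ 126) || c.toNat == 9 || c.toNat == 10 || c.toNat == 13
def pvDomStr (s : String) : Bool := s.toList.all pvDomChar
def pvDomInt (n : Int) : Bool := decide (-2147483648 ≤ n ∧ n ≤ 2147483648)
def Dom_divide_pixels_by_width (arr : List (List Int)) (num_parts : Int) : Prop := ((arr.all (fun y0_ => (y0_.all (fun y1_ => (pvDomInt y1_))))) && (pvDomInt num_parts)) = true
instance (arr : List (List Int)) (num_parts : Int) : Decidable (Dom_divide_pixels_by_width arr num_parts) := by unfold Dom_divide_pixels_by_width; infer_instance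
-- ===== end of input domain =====

-- B chunks each row into its num_parts slices and then transposes with zip(*...),
-- instead of A's per-part outer loop slicing every row once per part (objective: alternative).

-- ===== PORT A =====
def divide_pixels_by_width (arr : List (List Int)) (num_parts : Int) : List (List (List Int)) :=
  let num_cols : Int := ((PySem.List.pyGet? arr 0).getD []).length
  let part_width := PySem.Int.floordiv num_cols num_parts
  (PySem.List.pyRange 0 num_parts 1).foldl
    (fun divided_parts i =>
      let start_col := i * part_width
      let end_col := start_col + part_width
      let part := arr.map (fun row => PySem.List.slice row (some start_col) (some end_col))
      divided_parts ++ [part]) []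

-- ===== PORT B =====
-- zip(*rows) over lists of row-chunks, truncating to the shortest (Python zip semantics)
def pvZipStar (rows : List (List (List Int))) : List (List (List Int)) :=
  if h : rows = [] ∨ rows.any List.isEmpty then []
  else (rows.map (fun r => r.headD [])) :: pvZipStar (rows.map List.tail)
termination_by (rows.headD []).length
decreasing_by
  rw [not_or] at h
  obtain ⟨h1, h2⟩ := h
  cases rows with
  | nil => exact absurd rfl h1
  | cons r rs =>
    cases r with
    | nil => simp at h2
    | cons x xs => simp

def divide_pixels_by_width_alt (arr : List (List Int)) (num_parts : Int) : List (List (List Int)) :=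
  let num_cols : Int := ((PySem.List.pyGet? arr 0).getD []).length
  let part_width := PySem.Int.floordiv num_cols num_parts
  let chunks_per_row := arr.map (fun row =>
    (PySem.List.pyRange 0 num_parts 1).map (fun j =>
      PySem.List.slice row (some (j * part_width)) (some ((j + 1) * part_width))))
  pvZipStar chunks_per_row

-- ===== PRECONDITION & SPEC =====
-- Pre_ excludes exactly the inputs where the Python A raises: arr = [] (IndexError on arr[0])
-- and num_parts = 0 (ZeroDivisionError).
def Pre_divide_pixels_by_width (arr : List (List Int)) (num_parts : Int) : Prop :=
  arr ≠ [] ∧ num_parts ≠ 0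
instance (arr : List (List Int)) (num_parts : Int) : Decidable (Pre_divide_pixels_by_width arr num_parts) := by unfold Pre_divide_pixels_by_width; infer_instance
def pvWitness_divide_pixels_by_width : List (List Int) × Int := ([[1, 2, 3, 4], [5, 6, 7, 8]], 2)

def Spec_divide_pixels_by_width (arr : List (List Int)) (num_parts : Int) (out : List (List (List Int))) : Prop := out = divide_pixels_by_width_alt arr num_parts
instance (arr : List (List Int)) (num_parts : Int) (out : List (List (List Int))) : Decidable (Spec_divide_pixels_by_width arr num_parts out) := by unfold Spec_divide_pixels_by_width; infer_instance

-- ===== CLAIM (what is proved, stated in full; the proofs are below) =====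
def Claim_equal_divide_pixels_by_width : Prop := ∀ (arr : List (List Int)) (num_parts : Int), Dom_divide_pixels_by_width arr num_parts → Pre_divide_pixels_by_width arr num_parts → Spec_divide_pixels_by_width arr num_parts (divide_pixels_by_width arr num_parts)

-- ===== LEMMAS AND PROOFS =====

-- transposing per-row maps over the same index list gives the per-index maps over the rows
theorem pvZipStar_map_map (arr : List (List Int)) (harr : arr ≠ []) (L : List Int)
    (g : List Int → Int → List Int) :
    pvZipStar (arr.map (fun row => L.map (g row))) =
      L.map (fun i => arr.map (fun row => g row i)) := by
  induction L with
  | nil =>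
    rw [pvZipStar]
    simp only [List.map_nil]
    rw [dif_pos]
    right
    cases arr with
    | nil => exact absurd rfl harr
    | cons r rs => simp
  | cons i L' ih =>
    rw [pvZipStar, dif_neg]
    · simp only [List.map_map, List.map_cons, Function.comp_def, List.headD_cons,
        List.tail_cons]
      rw [ih]
    · rw [not_or]
      constructor
      · cases arr with
        | nil => exact absurd rfl harr
        | cons r rs => simp
      · simp only [List.any_eq_true, List.mem_map, not_exists, not_and]
        rintro x ⟨row, _, rfl⟩
        simp

-- ===== VERDICT (by name: the statement is the Claim_ definition above) =====
theorem divide_pixels_by_width_spec : Claim_equal_divide_pixels_by_width := by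
  intro arr num_parts _ hpre
  unfold Spec_divide_pixels_by_width divide_pixels_by_width divide_pixels_by_width_alt
  simp only []
  rw [PySem.List.foldl_append_singleton_eq_map, List.nil_append]
  rw [pvZipStar_map_map arr hpre.1]
  apply List.map_congr_left
  intro i _
  apply List.map_congr_left
  intro row _
  congr 2
  ring
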